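-- pv_equiv track=rewrite | github.com/Saykon-k/pit | 2 && 3 semest/course work #2/backend.py | obrabotka
-- ===== SOURCE A (Python) =====
-- def obrabotka(x_y):
--     num_out_of_line = []
--     num =[]
--     real_x_y = ""
--     for i in range(len(x_y)):
--         if x_y[i] in "0123456789":
--             real_x_y += x_y[i]
--             try:
--                 if x_y[i+1] not in "0123456789":
--                    num_out_of_line.append(real_x_y)
--                    real_x_y = ""
--             except:
--                    num_out_of_line.append(real_x_y)
--     real_x_y = list(map(int, num_out_of_line))
--     return real_x_y
-- ===== SOURCE B (Python) =====
-- def obrabotka(x_y):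
--     # Map every non-digit to a space, then let str.split() cut out the
--     # maximal digit runs; convert each run with int().
--     cleaned = ''.join(c if c in "0123456789" else ' ' for c in x_y)
--     return [int(tok) for tok in cleaned.split()]
-- ===== Notes on version B (the rewrite author's own statement) =====
-- stated objective: idiomatic
-- what changed: Replaces the index loop with one-character lookahead and try/except by masking non-digits to spaces and using str.split() to extract the maximal digit runs, then mapping int over them.
import Mathlib
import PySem

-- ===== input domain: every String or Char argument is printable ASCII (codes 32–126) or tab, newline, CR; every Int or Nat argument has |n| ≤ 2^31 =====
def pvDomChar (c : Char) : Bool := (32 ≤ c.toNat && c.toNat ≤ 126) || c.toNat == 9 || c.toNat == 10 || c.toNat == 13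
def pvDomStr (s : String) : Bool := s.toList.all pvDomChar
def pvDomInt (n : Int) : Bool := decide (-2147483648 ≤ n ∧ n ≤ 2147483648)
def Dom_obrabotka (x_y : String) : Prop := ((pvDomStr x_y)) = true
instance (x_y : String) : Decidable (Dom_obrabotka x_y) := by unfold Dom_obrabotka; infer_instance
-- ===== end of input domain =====

-- B replaces A's index loop with lookahead and try/except by masking non-digits to
-- spaces and splitting; objective: more idiomatic, same exact result.

-- ===== PORT A =====
-- the literal "0123456789" that A tests membership in
def pvDigits : List Char := "0123456789".toList

-- A's for-loop over i in range(len(x_y)), written as recursion over the character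
-- list with the same one-character lookahead; `real` is A's real_x_y accumulator.
-- The try/except around x_y[i+1] is the `rest = []` case (IndexError at the last index).
def obLoopA : List Char → List Char → List (List Char)
  | [], _ => []
  | c :: rest, real =>
    if c ∈ pvDigits then
      let real' := real ++ [c]
      match rest with
      | [] => [real']                   -- except IndexError: append, loop ends
      | d :: _ =>
        if d ∈ pvDigits then obLoopA rest real'
        else real' :: obLoopA rest []
    else obLoopA rest real

def obrabotka (x_y : String) : List Int :=
  -- int(tok): exact here, every token is a nonempty digit run so int() cannot raise
  (obLoopA x_y.toList []).map (fun t => (PySem.Int.ofChars? t).getD 0)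

-- ===== PORT B =====
def obrabotka_alt (x_y : String) : List Int :=
  let cleaned := x_y.toList.map (fun c => if c ∈ pvDigits then c else ' ')
  -- cleaned.split() = PySem.Chars.split₀; int(tok) exact as above
  (PySem.Chars.split₀ cleaned).map (fun t => (PySem.Int.ofChars? t).getD 0)

-- ===== PRECONDITION & SPEC =====
def Spec_obrabotka (x_y : String) (out : List Int) : Prop := out = obrabotka_alt x_y
instance (x_y : String) (out : List Int) : Decidable (Spec_obrabotka x_y out) := by unfold Spec_obrabotka; infer_instance

-- ===== CLAIM (what is proved, stated in full; the proofs are below) =====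
def Claim_equal_obrabotka : Prop := ∀ (x_y : String), Dom_obrabotka x_y → Spec_obrabotka x_y (obrabotka x_y)

-- ===== LEMMAS AND PROOFS =====

-- proof-side tokenizer that flushes a pending run at the end of the string
def obF : List Char → List Char → List (List Char)
  | [], real => if real = [] then [] else [real]
  | c :: rest, real =>
    if c ∈ pvDigits then obF rest (real ++ [c])
    else if real = [] then obF rest [] else real :: obF rest []

lemma isspace_digit {c : Char} (h : c ∈ pvDigits) : PySem.Chars.isspace c = false := by
  simp [pvDigits] at h
  rcases h with h|h|h|h|h|h|h|h|h|h <;> subst h <;> decide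

lemma go_eq_obF (cs : List Char) : ∀ (real : List Char) (acc : List (List Char)),
    PySem.Chars.split₀.go (cs.map (fun c => if c ∈ pvDigits then c else ' ')) real.reverse acc
      = acc.reverse ++ obF cs real := by
  induction cs with
  | nil =>
    intro real acc
    by_cases h : real = [] <;>
      simp [PySem.Chars.split₀.go, obF, h, List.isEmpty_iff]
  | cons c rest ih =>
    intro real acc
    by_cases hc : c ∈ pvDigits
    · have hsp := isspace_digit hc
      simp only [List.map_cons, if_pos hc, PySem.Chars.split₀.go, hsp, Bool.false_eq_true,
        if_false]
      have : c :: real.reverse = (real ++ [c]).reverse := by simp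
      rw [this, ih (real ++ [c]) acc]
      simp [obF, hc]
    · simp only [List.map_cons, if_neg hc, PySem.Chars.split₀.go]
      have hsp : PySem.Chars.isspace ' ' = true := by decide
      rw [hsp]
      by_cases h : real = []
      · subst h
        simpa [obF, hc] using ih [] acc
      · have h2 := ih [] (real :: acc)
        simp only [List.reverse_nil] at h2
        simp [List.isEmpty_iff, h, List.reverse_reverse, h2, obF, hc]

lemma obLoopA_eq_obF (cs : List Char) : ∀ (real : List Char),
    (real ≠ [] → ∃ d t, cs = d :: t ∧ d ∈ pvDigits) → obLoopA cs real = obF cs real := by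
  induction cs with
  | nil =>
    intro real h
    have hreal : real = [] := by
      by_contra hne
      obtain ⟨d, t, ht, _⟩ := h hne
      exact absurd ht (by simp)
    simp [obLoopA, obF, hreal]
  | cons c rest ih =>
    intro real h
    by_cases hc : c ∈ pvDigits
    · cases rest with
      | nil => simp [obLoopA, obF, hc]
      | cons d t =>
        by_cases hd : d ∈ pvDigits
        · simpa [obLoopA, obF, hc, hd] using ih (real ++ [c]) (fun _ => ⟨d, t, rfl, hd⟩)
        · simpa [obLoopA, obF, hc, hd] using ih [] (fun hne => absurd rfl hne)
    · have hreal : real = [] := by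
        by_contra hne
        obtain ⟨d, t, ht, hdg⟩ := h hne
        cases ht
        exact hc hdg
      subst hreal
      simpa [obLoopA, obF, hc] using ih [] (fun hne => absurd rfl hne)

lemma tokens_eq (cs : List Char) :
    obLoopA cs [] = PySem.Chars.split₀ (cs.map (fun c => if c ∈ pvDigits then c else ' ')) := by
  have h1 := go_eq_obF cs [] []
  simp only [List.reverse_nil, List.nil_append] at h1
  rw [PySem.Chars.split₀, h1, obLoopA_eq_obF cs [] (fun hne => absurd rfl hne)]

-- ===== VERDICT (by name: the statement is the Claim_ definition above) =====
theorem obrabotka_spec : Claim_equal_obrabotka := by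
  intro x_y _
  unfold Spec_obrabotka obrabotka obrabotka_alt
  rw [tokens_eq]
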